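-- pv_equiv track=rewrite | github.com/mehtashish778/GraphAttributeLearning | src/data/normalization.py | filter_by_min_support
-- ===== SOURCE A (Python) =====
-- from collections import Counter
-- from typing import Dict, Iterable, List, Sequence, Set, Tuple
--
-- def filter_by_min_support(
--     normalized_label_lists: Sequence[Sequence[str]],
--     min_support: int,
-- ) -> Tuple[List[List[str]], Dict[str, int]]:
--     counter: Counter[str] = Counter()
--     for labels in normalized_label_lists:
--         counter.update(set(labels))
--
--     keep_labels = {name for name, count in counter.items() if count >= min_support}
--     filtered: List[List[str]] = []
--     for labels in normalized_label_lists: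
--         filtered.append(sorted([label for label in set(labels) if label in keep_labels]))
--
--     filtered_counter: Counter[str] = Counter()
--     for labels in filtered:
--         filtered_counter.update(set(labels))
--     return filtered, dict(sorted(filtered_counter.items()))
-- ===== SOURCE B (Python) =====
-- def filter_by_min_support(normalized_label_lists, min_support):
--     # Inverted index: label -> list of indices of documents containing it (increasing).
--     postings = {}
--     for i, labels in enumerate(normalized_label_lists):
--         for label in set(labels):
--             postings[label] = postings.get(label, []) + [i]
--     # Emit labels in ascending order; each kept label is appended to the documents
--     # listed in its postings, so every per-document list comes out already sorted.
--     filtered = [[] for _ in normalized_label_lists]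
--     support = {}
--     for label in sorted(postings):
--         docs = postings[label]
--         if len(docs) >= min_support:
--             support[label] = len(docs)
--             for i in docs:
--                 filtered[i].append(label)
--     return filtered, support
-- ===== Notes on version B (the rewrite author's own statement) =====
-- stated objective: alternative
-- what changed: B replaces A's count/filter/re-sort/recount passes by an inverted index: one pass builds label->postings (document indices), then labels are walked once in globally sorted order and each kept label is appended to the documents in its postings, so every per-document list comes out sorted with no per-document sort and the support dict is just the postings lengths (no recount pass).
import Mathlib
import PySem

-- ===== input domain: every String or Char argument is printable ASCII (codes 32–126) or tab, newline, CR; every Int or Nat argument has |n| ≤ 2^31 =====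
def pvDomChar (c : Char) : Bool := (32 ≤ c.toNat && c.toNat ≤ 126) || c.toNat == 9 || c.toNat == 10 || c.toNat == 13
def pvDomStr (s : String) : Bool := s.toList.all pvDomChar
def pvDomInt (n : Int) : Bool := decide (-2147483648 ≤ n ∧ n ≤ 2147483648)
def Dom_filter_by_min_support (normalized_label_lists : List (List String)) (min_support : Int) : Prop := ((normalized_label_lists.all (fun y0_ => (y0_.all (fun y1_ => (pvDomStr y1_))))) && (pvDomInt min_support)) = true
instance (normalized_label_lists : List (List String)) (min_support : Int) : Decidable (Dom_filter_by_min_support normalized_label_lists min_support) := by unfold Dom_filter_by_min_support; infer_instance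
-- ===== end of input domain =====

-- B replaces A's count/filter/per-document-sort/recount passes by an inverted index
-- (label -> postings of document indices) built in one pass; labels are then walked once in
-- globally sorted order and each kept label is appended to the documents in its postings, so the
-- per-document lists come out sorted without a per-document sort and the support dict is the
-- postings lengths (objective: alternative algorithm).

-- ===== PORT A =====
def filter_by_min_support (normalized_label_lists : List (List String)) (min_support : Int) : List (List String) × (List (String × Int)) :=
  let counter : PySem.Dict String Int :=
    normalized_label_lists.foldl
      (fun d labels => (PySem.Set.ofList labels : List String).foldl (fun d x => d.modify x 0 (· + 1)) d)
      PySem.Dict.empty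
  let keep_labels : PySem.Set String :=
    PySem.Set.ofList ((counter.items.filter (fun p => min_support ≤ p.2)).map (fun p => p.1))
  let filtered : List (List String) :=
    normalized_label_lists.foldl
      (fun acc labels =>
        acc ++ [PySem.List.sorted ((PySem.Set.ofList labels : List String).filter
                  (fun l => PySem.Set.contains keep_labels l)) (fun x => x)])
      []
  let filtered_counter : PySem.Dict String Int :=
    filtered.foldl
      (fun d labels => (PySem.Set.ofList labels : List String).foldl (fun d x => d.modify x 0 (· + 1)) d)
      PySem.Dict.empty
  (filtered, PySem.List.sorted2 filtered_counter.items (fun p => p.1) (fun p => p.2))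

-- ===== PORT B =====
-- B's first loop: postings[label] = postings.get(label, []) + [i] over enumerate(lists)
def pvAltPostings (normalized_label_lists : List (List String)) : PySem.Dict String (List Int) :=
  (PySem.List.enumerate normalized_label_lists 0).foldl
    (fun d p => (PySem.Set.ofList p.2 : List String).foldl
        (fun d label => d.modify label [] (fun ds => ds ++ [p.1])) d)
    PySem.Dict.empty

-- B's outer loop body: if the label is kept, append it to each of its documents and record its support
def pvAltStep (min_support : Int) (postings : PySem.Dict String (List Int))
    (fs : List (List String) × PySem.Dict String Int) (label : String) :
    List (List String) × PySem.Dict String Int :=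
  let docs := postings.getD label []
  if min_support ≤ (docs.length : Int) then
    -- indices from enumerate are nonnegative, so .toNat is exact here
    (docs.foldl (fun f i => f.modify i.toNat (fun l => l ++ [label])) fs.1,
     fs.2.insert label (docs.length : Int))
  else fs

def filter_by_min_support_alt (normalized_label_lists : List (List String)) (min_support : Int) : List (List String) × (List (String × Int)) :=
  let postings := pvAltPostings normalized_label_lists
  let res := (PySem.List.sorted postings.keys (fun x => x)).foldl
      (pvAltStep min_support postings)
      (normalized_label_lists.map (fun _ => ([] : List String)), PySem.Dict.empty)
  (res.1, res.2.items)

-- ===== PRECONDITION & SPEC =====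
def Spec_filter_by_min_support (normalized_label_lists : List (List String)) (min_support : Int) (out : List (List String) × (List (String × Int))) : Prop := out = filter_by_min_support_alt normalized_label_lists min_support
instance (normalized_label_lists : List (List String)) (min_support : Int) (out : List (List String) × (List (String × Int))) : Decidable (Spec_filter_by_min_support normalized_label_lists min_support out) := by unfold Spec_filter_by_min_support; infer_instance

-- ===== CLAIM (what is proved, stated in full; the proofs are below) =====
def Claim_equal_filter_by_min_support : Prop := ∀ (normalized_label_lists : List (List String)) (min_support : Int), Dom_filter_by_min_support normalized_label_lists min_support → Spec_filter_by_min_support normalized_label_lists min_support (filter_by_min_support normalized_label_lists min_support)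

-- ===== LEMMAS AND PROOFS =====
def pvS1 (L : List (List String)) : List String :=
  L.flatMap (fun ls => (PySem.Set.ofList ls : List String))
def pvC (L : List (List String)) : PySem.Dict String Int :=
  PySem.Dict.counter (pvS1 L)
def pvT (L : List (List String)) (m : Int) : List (String × Int) :=
  (PySem.List.sorted2 (pvC L).items (fun p => p.1) (fun p => p.2) false).filter (fun p => m ≤ p.2)

lemma counterA_eq (L : List (List String)) :
    L.foldl (fun d labels => (PySem.Set.ofList labels : List String).foldl (fun d x => d.modify x 0 (· + 1)) d) PySem.Dict.empty = pvC L := by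
  rw [pvC, pvS1, PySem.Dict.counter_eq_foldl, List.foldl_flatMap]

lemma keysC (L : List (List String)) : ((pvC L).items.map (fun p => p.1)) = (pvC L).keys := rfl

lemma nodup_T_keys (L : List (List String)) (m : Int) : ((pvT L m).map (fun p => p.1)).Nodup := by
  have h1 : ((PySem.List.sorted2 (pvC L).items (fun p => p.1) (fun p => p.2) false).map (fun p => p.1)).Nodup := by
    have hp := (PySem.List.sorted2_perm (pvC L).items (fun p => p.1) (fun p => p.2) false).map (fun p => p.1)
    rw [hp.nodup_iff, keysC]
    exact PySem.Dict.nodup_keys_counter _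
  exact h1.sublist (List.Sublist.map _ List.filter_sublist)

lemma mem_T_keys (L : List (List String)) (m : Int) (k : String) :
    (k ∈ (pvT L m).map (fun p => p.1)) ↔ (k ∈ pvS1 L ∧ m ≤ (List.count k (pvS1 L) : Int)) := by
  simp only [pvT, List.mem_map, List.mem_filter,
    (PySem.List.sorted2_perm (pvC L).items (fun p => p.1) (fun p => p.2) false).mem_iff]
  simp only [pvC, PySem.Dict.items_counter, List.mem_map, decide_eq_true_eq]
  constructor
  · rintro ⟨p, ⟨⟨k', hk', rfl⟩, hle⟩, rfl⟩
    exact ⟨(PySem.Set.mem_ofList _ _).mp hk', hle⟩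
  · rintro ⟨hmem, hle⟩
    exact ⟨(k, (List.count k (pvS1 L) : Int)), ⟨⟨k, (PySem.Set.mem_ofList _ _).mpr hmem, rfl⟩, hle⟩, rfl⟩

lemma insertBy_strict {α κ₁ κ₂ : Type} [LinearOrder κ₁] [LT κ₂] [DecidableLT κ₂]
    (k1 : α → κ₁) (k2 : α → κ₂) (x : α) (acc : List α)
    (hpw : acc.Pairwise (fun a b => k1 a < k1 b))
    (hne : ∀ y ∈ acc, k1 y ≠ k1 x) :
    (PySem.List.insertBy
        (fun a b => decide (k1 a < k1 b) || !decide (k1 b < k1 a) && decide (k2 a < k2 b)) x acc).Pairwise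
        (fun a b => k1 a < k1 b) ∧
    (PySem.List.insertBy
        (fun a b => decide (k1 a < k1 b) || !decide (k1 b < k1 a) && decide (k2 a < k2 b)) x acc).Perm (x :: acc) := by
  induction acc with
  | nil => simp [PySem.List.insertBy]
  | cons y ys ih =>
    have hyx : k1 y ≠ k1 x := hne y (by simp)
    rw [List.pairwise_cons] at hpw
    by_cases hcmp : (decide (k1 x < k1 y) || !decide (k1 y < k1 x) && decide (k2 x < k2 y)) = true
    · have hxy : k1 x < k1 y := by
        rcases Bool.or_eq_true_iff.mp hcmp with h | h
        · exact of_decide_eq_true h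
        · have hnlt : ¬ k1 y < k1 x := by
            have := (Bool.and_eq_true_iff.mp h).1
            simpa using this
          exact lt_of_le_of_ne (not_lt.mp hnlt) (Ne.symm hyx)
      refine ⟨?_, ?_⟩
      · simp only [PySem.List.insertBy, hcmp, if_true]
        rw [List.pairwise_cons]
        refine ⟨?_, List.pairwise_cons.mpr hpw⟩
        intro b hb
        rcases List.mem_cons.mp hb with rfl | h
        · exact hxy
        · exact lt_trans hxy (hpw.1 b h)
      · simp [PySem.List.insertBy, hcmp]
    · have hyltx : k1 y < k1 x := by
        have h1 : ¬ k1 x < k1 y := by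
          intro hc
          exact hcmp (by simp [hc])
        exact lt_of_le_of_ne (not_lt.mp h1) hyx
      have ihr := ih hpw.2 (fun z hz => hne z (by simp [hz]))
      refine ⟨?_, ?_⟩
      · simp only [PySem.List.insertBy, if_neg hcmp]
        rw [List.pairwise_cons]
        refine ⟨?_, ihr.1⟩
        intro b hb
        rcases (PySem.List.mem_insertBy _ x b ys).mp hb with rfl | h
        · exact hyltx
        · exact hpw.1 b h
      · simp only [PySem.List.insertBy, if_neg hcmp]
        exact ((ihr.2.cons y).trans (List.Perm.swap x y ys))

lemma foldl_insertBy_inv {α κ₁ κ₂ : Type} [LinearOrder κ₁] [LT κ₂] [DecidableLT κ₂]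
    (k1 : α → κ₁) (k2 : α → κ₂) (xs : List α) : ∀ acc : List α,
    ((acc ++ xs).map k1).Nodup → acc.Pairwise (fun a b => k1 a < k1 b) →
    (xs.foldl (fun a x => PySem.List.insertBy
        (fun a b => decide (k1 a < k1 b) || !decide (k1 b < k1 a) && decide (k2 a < k2 b)) x a) acc).Pairwise
        (fun a b => k1 a < k1 b) ∧
    (xs.foldl (fun a x => PySem.List.insertBy
        (fun a b => decide (k1 a < k1 b) || !decide (k1 b < k1 a) && decide (k2 a < k2 b)) x a) acc).Perm (acc ++ xs) := by
  induction xs with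
  | nil => intro acc h hp; exact ⟨hp, by simp⟩
  | cons x xs ih =>
    intro acc h hp
    have hne : ∀ y ∈ acc, k1 y ≠ k1 x := by
      intro y hy hEq
      have hnd := h
      rw [List.map_append, List.nodup_append'] at hnd
      exact hnd.2.2 (List.mem_map_of_mem hy) (hEq ▸ by simp)
    have hstep := insertBy_strict k1 k2 x acc hp hne
    have hperm1 : ((PySem.List.insertBy (fun a b => decide (k1 a < k1 b) || !decide (k1 b < k1 a) && decide (k2 a < k2 b)) x acc) ++ xs).Perm ((acc ++ x :: xs)) := by
      exact (hstep.2.append_right xs).trans (by simpa using ((List.perm_middle (a := x) (l₁ := acc) (l₂ := xs)).symm))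
    have hnd' : (((PySem.List.insertBy (fun a b => decide (k1 a < k1 b) || !decide (k1 b < k1 a) && decide (k2 a < k2 b)) x acc) ++ xs).map k1).Nodup :=
      ((hperm1.map k1).nodup_iff).mpr h
    have ihr := ih _ hnd' hstep.1
    simp only [List.foldl_cons]
    exact ⟨ihr.1, ihr.2.trans hperm1⟩

lemma sorted2_pairwise_of_nodup {α κ₁ κ₂ : Type} [LinearOrder κ₁] [LT κ₂] [DecidableLT κ₂]
    (k1 : α → κ₁) (k2 : α → κ₂) (xs : List α) (h : (xs.map k1).Nodup) :
    (PySem.List.sorted2 xs k1 k2 false).Pairwise (fun a b => k1 a < k1 b) := by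
  have := foldl_insertBy_inv k1 k2 xs [] (by simpa using h) (by simp)
  simpa [PySem.List.sorted2] using this.1

lemma sorted2_eq_of_perm_of_pairwise_lt {α κ₁ κ₂ : Type} [LinearOrder κ₁] [LT κ₂] [DecidableLT κ₂]
    (k1 : α → κ₁) (k2 : α → κ₂) (xs ys : List α)
    (hperm : ys.Perm xs) (hpw : ys.Pairwise (fun a b => k1 a < k1 b)) :
    PySem.List.sorted2 xs k1 k2 false = ys := by
  have hnd : (xs.map k1).Nodup := by
    have hmap : (ys.map k1).Pairwise (· < ·) := by
      rw [List.pairwise_map]; exact hpw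
    exact ((hperm.map k1).nodup_iff).mp (hmap.imp (fun hab => ne_of_lt hab))
  have h1 := sorted2_pairwise_of_nodup k1 k2 xs hnd
  have h2 : (PySem.List.sorted2 xs k1 k2 false).Perm ys :=
    (PySem.List.sorted2_perm xs k1 k2 false).trans hperm.symm
  exact List.Perm.eq_of_pairwise (fun a b _ _ hab hba => absurd hba (lt_asymm hab)) h1 hpw h2

lemma pairwise_T (L : List (List String)) (m : Int) :
    (pvT L m).Pairwise (fun a b => a.1 < b.1) := by
  have h := sorted2_pairwise_of_nodup (fun p : String × Int => p.1) (fun p => p.2) (pvC L).items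
    (by rw [keysC]; exact PySem.Dict.nodup_keys_counter _)
  exact h.sublist List.filter_sublist

-- canonical sorted distinct label list
def pvSK (L : List (List String)) : List String :=
  PySem.List.sorted (PySem.Set.ofList (pvS1 L) : List String) (fun x => x) false

lemma pvSK_pairwise (L : List (List String)) : (pvSK L).Pairwise (· < ·) :=
  PySem.List.sorted_ofList_pairwise_lt (pvS1 L)

lemma pvSK_nodup (L : List (List String)) : (pvSK L).Nodup :=
  (pvSK_pairwise L).imp (fun h => ne_of_lt h)

lemma mem_pvSK (L : List (List String)) (k : String) : k ∈ pvSK L ↔ k ∈ pvS1 L := by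
  rw [pvSK, PySem.List.mem_sorted, PySem.Set.mem_ofList]

lemma pvSK_perm (L : List (List String)) : (pvSK L).Perm (PySem.Set.ofList (pvS1 L) : List String) :=
  PySem.List.sorted_perm _ _ _

-- pvT expressed over pvSK
lemma pvT_eq_canon (L : List (List String)) (m : Int) :
    pvT L m = ((pvSK L).filter (fun k => decide (m ≤ (List.count k (pvS1 L) : Int)))).map
      (fun k => (k, (List.count k (pvS1 L) : Int))) := by
  have hsorted2 : PySem.List.sorted2 (pvC L).items (fun p => p.1) (fun p => p.2) false
      = (pvSK L).map (fun k => (k, (List.count k (pvS1 L) : Int))) := by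
    apply sorted2_eq_of_perm_of_pairwise_lt
    · rw [pvC, PySem.Dict.items_counter]
      exact (pvSK_perm L).map _
    · rw [List.pairwise_map]
      exact pvSK_pairwise L
  rw [pvT, hsorted2, List.filter_map]
  rfl

-- ---------- B-side: the flat postings stream ----------
def pvP (L : List (List String)) : List (String × Int) :=
  (PySem.List.enumerate L 0).flatMap (fun p => (PySem.Set.ofList p.2 : List String).map (fun x => (x, p.1)))

lemma postings_eq_flat (L : List (List String)) :
    pvAltPostings L = (pvP L).foldl (fun d p => d.modify p.1 [] (fun ds => ds ++ [p.2])) PySem.Dict.empty := by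
  rw [pvP, List.foldl_flatMap]
  simp only [pvAltPostings, List.foldl_map]

def pvDocs (L : List (List String)) (k : String) : List Int :=
  ((PySem.List.enumerate L 0).filter (fun p => decide (k ∈ p.2))).map (fun p => p.1)

lemma flat_filter (k : String) (i : Int) (S : List String) (hnd : S.Nodup) :
    (((S.map (fun x => (x, i))).filter (fun q => q.1 == k)).map (fun q => q.2))
      = if k ∈ S then [i] else [] := by
  induction S with
  | nil => simp
  | cons x S' ih =>
    rw [List.nodup_cons] at hnd
    by_cases hx : x = k
    · subst hx
      have hfilt : ((S'.map (fun x => (x, i))).filter (fun q => q.1 == x)) = [] := by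
        rw [List.filter_eq_nil_iff]
        rintro q hq
        rcases List.mem_map.mp hq with ⟨y, hy, rfl⟩
        simp only [beq_iff_eq]
        intro h
        exact hnd.1 (h ▸ hy)
      simp [hfilt]
    · have hb : (((x, i).1 == k)) = false := by simpa using hx
      rw [List.map_cons, List.filter_cons, hb]
      simp only [Bool.false_eq_true, if_false]
      rw [ih hnd.2]
      by_cases hk : k ∈ S'
      · rw [if_pos hk, if_pos (by simp [hk])]
      · rw [if_neg hk, if_neg (by simp [hk, Ne.symm hx])]

lemma docs_getD (L : List (List String)) (k : String) :
    (pvAltPostings L).getD k [] = pvDocs L k := by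
  rw [postings_eq_flat, PySem.Dict.getD_foldl_modify_append]
  simp only [PySem.Dict.getD_empty, List.nil_append, pvP, pvDocs]
  induction (PySem.List.enumerate L 0) with
  | nil => simp
  | cons p E ih =>
    rw [List.flatMap_cons, List.filter_append, List.map_append, ih,
      flat_filter k p.1 _ (PySem.Set.nodup_ofList p.2), List.filter_cons]
    by_cases hmem : k ∈ p.2
    · rw [if_pos ((PySem.Set.mem_ofList _ _).mpr hmem), if_pos (by simpa using hmem)]
      simp
    · rw [if_neg (fun h => hmem ((PySem.Set.mem_ofList _ _).mp h)), if_neg (by simpa using hmem)]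
      simp

lemma docs_pairwise (L : List (List String)) (k : String) : (pvDocs L k).Pairwise (· < ·) := by
  rw [pvDocs, List.pairwise_map]
  exact (PySem.List.pairwise_lt_enumerate L 0).sublist List.filter_sublist

lemma docs_nonneg (L : List (List String)) (k : String) : ∀ i ∈ pvDocs L k, 0 ≤ i := by
  intro i hi
  rcases List.mem_map.mp hi with ⟨p, hp, rfl⟩
  rcases (PySem.List.mem_enumerate_iff L 0 p).mp (List.mem_filter.mp hp).1 with ⟨j, hj, rfl⟩
  simp

lemma docs_mem (L : List (List String)) (k : String) (j : Nat) (hj : j < L.length) :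
    ((j : Int) ∈ pvDocs L k) ↔ k ∈ L[j] := by
  rw [pvDocs]
  constructor
  · intro h
    rcases List.mem_map.mp h with ⟨p, hp, hfst⟩
    rcases List.mem_filter.mp hp with ⟨hpe, hpk⟩
    rcases (PySem.List.mem_enumerate_iff L 0 p).mp hpe with ⟨j', hj', rfl⟩
    have : j = j' := by
      have : (j : Int) = 0 + j' := hfst.symm
      omega
    subst this
    simpa using hpk
  · intro h
    apply List.mem_map.mpr
    refine ⟨((j : Int), L[j]), List.mem_filter.mpr ⟨?_, by simpa using h⟩, rfl⟩
    exact (PySem.List.mem_enumerate_iff L 0 _).mpr ⟨j, hj, by simp⟩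

lemma docs_len_aux (L : List (List String)) (k : String) : ∀ s : Int,
    ((PySem.List.enumerate L s).filter (fun p => decide (k ∈ p.2))).length
      = List.count k (pvS1 L) := by
  induction L with
  | nil => intro s; simp [pvS1]
  | cons ls rest ih =>
    intro s
    rw [PySem.List.enumerate_cons, List.filter_cons]
    have hcnt : List.count k (pvS1 (ls :: rest)) =
        List.count k (PySem.Set.ofList ls : List String) + List.count k (pvS1 rest) := by
      rw [pvS1, List.flatMap_cons, List.count_append]; rfl
    by_cases hmem : k ∈ ls
    · rw [if_pos (by simpa using hmem)]
      rw [hcnt, List.count_eq_one_of_mem (PySem.Set.nodup_ofList ls) ((PySem.Set.mem_ofList _ _).mpr hmem)]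
      simp [ih (s + 1)]
      omega
    · rw [if_neg (by simpa using hmem)]
      rw [hcnt, List.count_eq_zero_of_not_mem (fun h => hmem ((PySem.Set.mem_ofList _ _).mp h))]
      simp [ih (s + 1)]

lemma docs_len (L : List (List String)) (k : String) :
    (pvDocs L k).length = List.count k (pvS1 L) := by
  rw [pvDocs, List.length_map]
  exact docs_len_aux L k 0

lemma keys_postings (L : List (List String)) :
    (pvAltPostings L).keys = (PySem.Set.ofList (pvS1 L) : List String) := by
  rw [postings_eq_flat]
  rw [PySem.Dict.keys_foldl_modify_key (pvP L) (fun p => p.1) [] (fun _ p => fun ds => ds ++ [p.2]) PySem.Dict.empty]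
  have hmap : (pvP L).map (fun p => p.1) = pvS1 L := by
    rw [pvP, List.map_flatMap]
    simp only [List.map_map]
    have : pvS1 L = ((PySem.List.enumerate L 0).map (fun p => p.2)).flatMap (fun ls => (PySem.Set.ofList ls : List String)) := by
      rw [PySem.List.map_snd_enumerate, pvS1]
    rw [this, List.flatMap_map]
    have hfun : (fun (a : Int × List String) => List.map ((fun (p : String × Int) => p.1) ∘ fun x => (x, a.1)) (PySem.Set.ofList a.2 : List String)) = fun a => (PySem.Set.ofList a.2 : List String) := by
      funext a
      exact List.map_id' (PySem.Set.ofList a.2 : List String)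
    rw [hfun]
  rw [hmap]
  rfl

lemma sorted_keys_eq_pvSK (L : List (List String)) :
    PySem.List.sorted (pvAltPostings L).keys (fun x => x) false = pvSK L := by
  rw [keys_postings]
  rfl

-- ---------- B's outer fold ----------
def pvKept (L : List (List String)) (m : Int) : List String :=
  (pvSK L).filter (fun k => decide (m ≤ (List.count k (pvS1 L) : Int)))

lemma step_fold_snd (m : Int) (P : PySem.Dict String (List Int)) (ks : List String) :
    ∀ fs : List (List String) × PySem.Dict String Int,
    (ks.foldl (pvAltStep m P) fs).2
      = ((ks.filter (fun k => decide (m ≤ ((P.getD k []).length : Int)))).foldl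
          (fun s k => s.insert k ((P.getD k []).length : Int)) fs.2) := by
  induction ks with
  | nil => intro fs; rfl
  | cons k ks ih =>
    intro fs
    rw [List.foldl_cons, List.filter_cons]
    by_cases h : m ≤ ((P.getD k []).length : Int)
    · rw [if_pos (by simpa using h), List.foldl_cons, ih]
      simp only [pvAltStep, if_pos h]
    · rw [if_neg (by simpa using h), ih]
      simp only [pvAltStep, if_neg h]

lemma step_fold_fst (m : Int) (P : PySem.Dict String (List Int)) (ks : List String) :
    ∀ fs : List (List String) × PySem.Dict String Int,
    (ks.foldl (pvAltStep m P) fs).1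
      = ((ks.filter (fun k => decide (m ≤ ((P.getD k []).length : Int)))).foldl
          (fun f k => (P.getD k []).foldl (fun f i => f.modify i.toNat (fun l => l ++ [k])) f) fs.1) := by
  induction ks with
  | nil => intro fs; rfl
  | cons k ks ih =>
    intro fs
    rw [List.foldl_cons, List.filter_cons]
    by_cases h : m ≤ ((P.getD k []).length : Int)
    · rw [if_pos (by simpa using h), List.foldl_cons, ih]
      simp only [pvAltStep, if_pos h]
    · rw [if_neg (by simpa using h), ih]
      simp only [pvAltStep, if_neg h]

-- inner docs update, elementwise
lemma inner_upd (k : String) (D : List Int) (hpw : D.Pairwise (· < ·)) (hnn : ∀ i ∈ D, 0 ≤ i) :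
    ∀ (f : List (List String)) (j : Nat),
    (D.foldl (fun f i => f.modify i.toNat (fun l => l ++ [k])) f)[j]?
      = f[j]?.map (fun l => if (j : Int) ∈ D then l ++ [k] else l) := by
  induction D with
  | nil => intro f j; simp [Option.map_id']
  | cons i D' ih =>
    intro f j
    rw [List.pairwise_cons] at hpw
    have hi : 0 ≤ i := hnn i (by simp)
    rw [List.foldl_cons, ih hpw.2 (fun x hx => hnn x (by simp [hx]))]
    rw [List.getElem?_modify]
    by_cases hji : (j : Int) = i
    · have hij : i.toNat = j := by omega
      have hnot : (j : Int) ∉ D' := by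
        intro hc
        have := hpw.1 _ hc
        omega
      have hmem : ((j : Int) ∈ i :: D') := by simp [hji]
      cases f[j]? <;> simp [hij, hmem, hnot]
    · have hij : i.toNat ≠ j := by omega
      have hmem : ((j : Int) ∈ i :: D') ↔ ((j : Int) ∈ D') := by simp [List.mem_cons, hji]
      cases f[j]? <;> simp [hij, hmem]

lemma outer_upd (L : List (List String)) (ks : List String)
    (hks : ∀ k ∈ ks, (pvDocs L k).Pairwise (· < ·) ∧ ∀ i ∈ pvDocs L k, 0 ≤ i) :
    ∀ (f : List (List String)) (j : Nat),
    (ks.foldl (fun f k => (pvDocs L k).foldl (fun f i => f.modify i.toNat (fun l => l ++ [k])) f) f)[j]?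
      = f[j]?.map (fun l => l ++ ks.filter (fun k => decide ((j : Int) ∈ pvDocs L k))) := by
  induction ks with
  | nil => intro f j; simp [Option.map_id']
  | cons k ks ih =>
    intro f j
    rw [List.foldl_cons, ih (fun x hx => hks x (by simp [hx]))]
    rw [inner_upd k _ (hks k (by simp)).1 (hks k (by simp)).2]
    rw [List.filter_cons]
    by_cases hmem : (j : Int) ∈ pvDocs L k
    · rw [if_pos (by simpa using hmem)]
      cases f[j]? <;> simp [hmem]
    · rw [if_neg (by simpa using hmem)]
      cases f[j]? <;> simp [hmem]

-- ---------- the A-side normal form (reproduced from A's passes) ----------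
def pvKeepA (L : List (List String)) (m : Int) : String → Bool :=
  fun l => PySem.Set.contains
    (PySem.Set.ofList (((pvC L).items.filter (fun p => m ≤ p.2)).map (fun p => p.1))) l

lemma keepA_iff (L : List (List String)) (m : Int) (k : String) :
    pvKeepA L m k = true ↔ (k ∈ pvS1 L ∧ m ≤ (List.count k (pvS1 L) : Int)) := by
  rw [pvKeepA, PySem.Set.contains_iff, PySem.Set.mem_ofList]
  simp only [List.mem_map, List.mem_filter, pvC, PySem.Dict.items_counter, decide_eq_true_eq]
  constructor
  · rintro ⟨p, ⟨⟨k', hk', rfl⟩, hle⟩, rfl⟩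
    exact ⟨(PySem.Set.mem_ofList _ _).mp hk', hle⟩
  · rintro ⟨hmem, hle⟩
    exact ⟨(k, (List.count k (pvS1 L) : Int)), ⟨⟨k, (PySem.Set.mem_ofList _ _).mpr hmem, rfl⟩, hle⟩, rfl⟩

def pvFdoc (L : List (List String)) (m : Int) (ls : List String) : List String :=
  PySem.List.sorted ((PySem.Set.ofList ls : List String).filter (pvKeepA L m)) (fun x => x)

def pvS2 (L : List (List String)) (m : Int) : List String :=
  (L.map (pvFdoc L m)).flatMap (fun ls => (PySem.Set.ofList ls : List String))

lemma mem_Fdoc (L : List (List String)) (m : Int) (ls : List String) (k : String) :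
    k ∈ pvFdoc L m ls ↔ (k ∈ ls ∧ pvKeepA L m k = true) := by
  rw [pvFdoc, PySem.List.mem_sorted, List.mem_filter, PySem.Set.mem_ofList]

lemma mem_S2 (L : List (List String)) (m : Int) (k : String) :
    k ∈ pvS2 L m ↔ k ∈ (pvT L m).map (fun p => p.1) := by
  rw [pvS2, mem_T_keys, List.mem_flatMap]
  constructor
  · rintro ⟨fs, hfs, hk⟩
    rcases List.mem_map.mp hfs with ⟨ls, hls, rfl⟩
    have := (mem_Fdoc L m ls k).mp ((PySem.Set.mem_ofList _ _).mp hk)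
    exact (keepA_iff L m k).mp this.2
  · rintro ⟨hmem, hle⟩
    rcases List.mem_flatMap.mp hmem with ⟨ls, hls, hk⟩
    refine ⟨pvFdoc L m ls, List.mem_map_of_mem hls, ?_⟩
    rw [PySem.Set.mem_ofList, mem_Fdoc]
    exact ⟨(PySem.Set.mem_ofList _ _).mp hk, (keepA_iff L m k).mpr ⟨hmem, hle⟩⟩

lemma count_S2 (L : List (List String)) (m : Int) (k : String)
    (hk : k ∈ (pvT L m).map (fun p => p.1)) :
    List.count k (pvS2 L m) = List.count k (pvS1 L) := by
  rw [pvS2, pvS1, List.count_flatMap, List.flatMap_def, List.map_map, ← List.flatMap_def, List.count_flatMap]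
  apply congrArg
  apply List.map_congr_left
  intro ls _
  have hc : pvKeepA L m k = true := (keepA_iff L m k).mpr ((mem_T_keys L m k).mp hk)
  simp only [Function.comp]
  by_cases hmem : k ∈ (PySem.Set.ofList ls : List String)
  · have h1 : k ∈ pvFdoc L m ls := (mem_Fdoc L m ls k).mpr ⟨(PySem.Set.mem_ofList _ _).mp hmem, hc⟩
    rw [List.count_eq_one_of_mem (PySem.Set.nodup_ofList _) ((PySem.Set.mem_ofList _ _).mpr h1),
        List.count_eq_one_of_mem (PySem.Set.nodup_ofList _) hmem]
  · have h1 : k ∉ pvFdoc L m ls := by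
      intro hcon
      exact hmem ((PySem.Set.mem_ofList _ _).mpr ((mem_Fdoc L m ls k).mp hcon).1)
    rw [List.count_eq_zero_of_not_mem (fun hcon => h1 ((PySem.Set.mem_ofList _ _).mp hcon)),
        List.count_eq_zero_of_not_mem hmem]

lemma T_self_map (L : List (List String)) (m : Int) :
    pvT L m = ((pvT L m).map (fun p => p.1)).map (fun k => (k, (List.count k (pvS1 L) : Int))) := by
  rw [List.map_map]
  conv_lhs => rw [← List.map_id (pvT L m)]
  apply List.map_congr_left
  intro p hp
  have hp' : p ∈ (pvC L).items := by
    have := (List.mem_filter.mp hp).1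
    exact ((PySem.List.sorted2_perm (pvC L).items (fun p => p.1) (fun p => p.2) false).mem_iff).mp this
  rw [pvC, PySem.Dict.items_counter] at hp'
  rcases List.mem_map.mp hp' with ⟨k, _, rfl⟩
  rfl

lemma T_perm_fc_items (L : List (List String)) (m : Int) :
    (pvT L m).Perm (PySem.Dict.counter (pvS2 L m)).items := by
  rw [PySem.Dict.items_counter]
  have hKperm : ((pvT L m).map (fun p => p.1)).Perm (PySem.Set.ofList (pvS2 L m) : List String) := by
    rw [List.perm_ext_iff_of_nodup (nodup_T_keys L m) (PySem.Set.nodup_ofList _)]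
    intro a
    rw [PySem.Set.mem_ofList, mem_S2]
  have h2 : ((pvT L m).map (fun p => p.1)).map (fun k => (k, (List.count k (pvS1 L) : Int)))
      = ((pvT L m).map (fun p => p.1)).map (fun k => (k, (List.count k (pvS2 L m) : Int))) :=
    List.map_congr_left (fun k hk => by rw [count_S2 L m k hk])
  rw [T_self_map L m, h2]
  exact hKperm.map _

lemma second_component (L : List (List String)) (m : Int) :
    PySem.List.sorted2 (PySem.Dict.counter (pvS2 L m)).items (fun p => p.1) (fun p => p.2) false = pvT L m :=
  sorted2_eq_of_perm_of_pairwise_lt _ _ _ _ (T_perm_fc_items L m) (pairwise_T L m)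

lemma A_normal (L : List (List String)) (m : Int) :
    filter_by_min_support L m = (L.map (pvFdoc L m), pvT L m) := by
  simp only [filter_by_min_support, counterA_eq,
    PySem.List.foldl_append_singleton_eq_map, List.nil_append]
  have hmap : (fun labels => PySem.List.sorted ((PySem.Set.ofList labels : List String).filter
      (fun l => PySem.Set.contains (PySem.Set.ofList (((pvC L).items.filter (fun p => m ≤ p.2)).map (fun p => p.1))) l)) (fun x => x)) = pvFdoc L m := by
    funext ls; rfl
  rw [hmap]
  have hfc : pvC (L.map (pvFdoc L m)) = PySem.Dict.counter (pvS2 L m) := rfl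
  rw [hfc, second_component]

-- ---------- B's normal form and the bridge ----------
lemma kept_docs_filter (L : List (List String)) (m : Int) :
    (pvSK L).filter (fun k => decide (m ≤ (((pvAltPostings L).getD k []).length : Int))) = pvKept L m := by
  rw [pvKept]
  apply List.filter_congr
  intro k _
  rw [docs_getD, docs_len]

lemma B_snd (L : List (List String)) (m : Int) :
    (filter_by_min_support_alt L m).2 = pvT L m := by
  simp only [filter_by_min_support_alt, sorted_keys_eq_pvSK]
  rw [step_fold_snd, kept_docs_filter]
  have hfresh : ∀ k ∈ pvKept L m, (PySem.Dict.empty : PySem.Dict String Int).contains k = false := by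
    intro k _; rfl
  have hnd : ((pvKept L m).map (fun k => k)).Nodup := by
    simp only [List.map_id']
    exact (pvSK_nodup L).filter _
  rw [PySem.Dict.items_foldl_insert_fresh (pvKept L m) (fun k => k) (fun k => (((pvAltPostings L).getD k []).length : Int)) PySem.Dict.empty hfresh hnd]
  have hempty : (PySem.Dict.empty : PySem.Dict String Int).items = [] := rfl
  rw [hempty, List.nil_append, pvT_eq_canon, pvKept]
  apply List.map_congr_left
  intro k _
  rw [docs_getD, docs_len]

lemma kept_filter_eq_Fdoc (L : List (List String)) (m : Int) (j : Nat) (hj : j < L.length) :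
    (pvKept L m).filter (fun k => decide ((j : Int) ∈ pvDocs L k)) = pvFdoc L m L[j] := by
  unfold pvKept
  rw [pvFdoc]
  symm
  apply PySem.List.sorted_eq_of_perm_of_pairwise_lt
  · rw [List.perm_ext_iff_of_nodup
      (((pvSK_nodup L).filter _).filter _)
      ((PySem.Set.nodup_ofList _).filter _)]
    intro k
    simp only [List.mem_filter, PySem.Set.mem_ofList, decide_eq_true_eq]
    rw [docs_mem L k j hj, mem_pvSK, keepA_iff]
    constructor
    · rintro ⟨⟨_, hcnt⟩, hmem⟩
      exact ⟨hmem, ⟨List.mem_flatMap.mpr ⟨L[j], List.getElem_mem hj, (PySem.Set.mem_ofList _ _).mpr hmem⟩, hcnt⟩⟩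
    · rintro ⟨hmem, hS1, hcnt⟩
      exact ⟨⟨hS1, hcnt⟩, hmem⟩
  · exact ((pvSK_pairwise L).filter _).filter _

lemma B_fst (L : List (List String)) (m : Int) :
    (filter_by_min_support_alt L m).1 = L.map (pvFdoc L m) := by
  simp only [filter_by_min_support_alt, sorted_keys_eq_pvSK]
  rw [step_fold_fst, kept_docs_filter]
  have hgd : (fun (f : List (List String)) (k : String) =>
      ((pvAltPostings L).getD k []).foldl (fun f i => f.modify i.toNat (fun l => l ++ [k])) f)
      = (fun f k => (pvDocs L k).foldl (fun f i => f.modify i.toNat (fun l => l ++ [k])) f) := by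
    funext f k; rw [docs_getD]
  rw [hgd]
  apply List.ext_getElem?
  intro j
  by_cases hj : j < L.length
  · rw [outer_upd L (pvKept L m) (fun k _ => ⟨docs_pairwise L k, docs_nonneg L k⟩)]
    rw [List.getElem?_map, List.getElem?_map, List.getElem?_eq_getElem hj]
    simp only [Option.map_some]
    rw [List.nil_append, kept_filter_eq_Fdoc L m j hj]
  · have h1 : L.length ≤ j := Nat.le_of_not_lt hj
    rw [outer_upd L (pvKept L m) (fun k _ => ⟨docs_pairwise L k, docs_nonneg L k⟩)]
    rw [List.getElem?_map, List.getElem?_map, List.getElem?_eq_none h1]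
    rfl

lemma ports_agree (L : List (List String)) (m : Int) :
    filter_by_min_support L m = filter_by_min_support_alt L m := by
  rw [A_normal]
  have := B_fst L m
  have h2 := B_snd L m
  cases hB : filter_by_min_support_alt L m with
  | mk f s =>
    rw [hB] at this h2
    simp at this h2
    rw [this, h2]

-- ===== VERDICT (by name: the statement is the Claim_ definition above) =====
theorem filter_by_min_support_spec : Claim_equal_filter_by_min_support := by
  intro L m _
  unfold Spec_filter_by_min_support
  exact ports_agree L m
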